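-- pv_equiv track=rewrite | github.com/khgiddon/misc | riddler_2021_10_01_notebook.py | check_equal_number_of_switches
-- ===== SOURCE A (Python) =====
-- def check_equal_number_of_switches(s):
--     """
--     All rangers should move the same number of times over the course of the schedule.
--     This includes potentially moving back to their starting assignment after the last week of the schedule.
--     """
--     switches_l = []  # List of number of switches for all rangers
--     for ranger in range(1, 5):
--         switches_n = 0  # Number of switches for a given ranger
--
--         # Loop sequence, because we have to check including the return
--         looped_sequence = s[:]
--         looped_sequence.append(looped_sequence[0])
--
--         # Count number of switches
--         for i in range(len(looped_sequence) - 1):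
--             if (
--                 ranger in looped_sequence[i][0] and ranger in looped_sequence[i + 1][1]
--             ) or (
--                 ranger in looped_sequence[i][1] and ranger in looped_sequence[i + 1][0]
--             ):
--                 switches_n += 1
--         switches_l.append(switches_n)
--
--         # Check switches are equal
--         if min(switches_l) != max(switches_l):
--             return False
--     return True
-- ===== SOURCE B (Python) =====
-- def check_equal_number_of_switches(s):
--     # Set-algebra reformulation: for each consecutive pair of weeks in the
--     # cyclic schedule, the rangers that switched are exactly
--     # (first[0] & second[1]) | (first[1] & second[0]); tally them in a dict
--     # counter, then check the four rangers' counts (default 0) coincide.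
--     counts = {}
--     for (a0, a1), (b0, b1) in zip(s, s[1:] + [s[0]]):
--         for r in (set(a0) & set(b1)) | (set(a1) & set(b0)):
--             counts[r] = counts.get(r, 0) + 1
--     return len({counts.get(r, 0) for r in (1, 2, 3, 4)}) == 1
-- ===== Notes on version B (the rewrite author's own statement) =====
-- stated objective: alternative
-- what changed: B replaces A's four per-ranger full scans with per-ranger membership tests by one pass over the cyclic consecutive pairs that computes the set of switching rangers via set intersections/union, tallies them in a dict counter, and finally compares the four counter lookups.
import Mathlib
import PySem

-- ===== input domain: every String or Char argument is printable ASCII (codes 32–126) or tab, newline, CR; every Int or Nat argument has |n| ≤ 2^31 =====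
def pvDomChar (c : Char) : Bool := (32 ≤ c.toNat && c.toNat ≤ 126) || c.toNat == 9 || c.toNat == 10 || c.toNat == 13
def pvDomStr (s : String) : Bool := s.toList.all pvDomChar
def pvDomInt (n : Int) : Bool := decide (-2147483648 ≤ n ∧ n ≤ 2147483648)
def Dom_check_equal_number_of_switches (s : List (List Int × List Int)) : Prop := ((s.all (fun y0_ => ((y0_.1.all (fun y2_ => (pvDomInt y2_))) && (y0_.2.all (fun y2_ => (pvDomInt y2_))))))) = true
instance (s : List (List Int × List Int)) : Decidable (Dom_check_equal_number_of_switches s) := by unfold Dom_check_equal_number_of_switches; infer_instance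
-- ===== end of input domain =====

-- ===== PORT A =====
-- B reformulates the switch test as set algebra ((a0&b1)|(a1&b0)) tallied in one
-- dict counter over the cyclic pairs, instead of A's four per-ranger scans. Objective: alternative.

-- A's inner 'for i in range(len(looped)-1)' reading looped[i], looped[i+1]:
-- the obvious structural recursion over adjacent pairs (exact: i walks left to right).
def pvA_count (ranger : Int) : List (List Int × List Int) → Int
  | a :: b :: rest =>
      (if (ranger ∈ a.1 ∧ ranger ∈ b.2) ∨ (ranger ∈ a.2 ∧ ranger ∈ b.1) then 1 else 0)
        + pvA_count ranger (b :: rest)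
  | _ => 0

-- A's outer 'for ranger in range(1,5)' with the early 'return False'.
-- looped_sequence[0] on empty s is an IndexError (excluded by Pre_), so headI is exact here.
def pvA_loop (s : List (List Int × List Int)) : List Int → List Int → Bool
  | [], _ => true
  | r :: rs, acc =>
      let looped := s ++ [s.headI]
      let acc' := acc ++ [pvA_count r looped]
      if PySem.List.min? acc' (fun x => x) ≠ PySem.List.max? acc' (fun x => x) then false
      else pvA_loop s rs acc'

def check_equal_number_of_switches (s : List (List Int × List Int)) : Bool :=
  pvA_loop s [1, 2, 3, 4] []

-- ===== PORT B =====
-- '(set(a0) & set(b1)) | (set(a1) & set(b0))' for one consecutive pair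
def pvB_movers (a b : List Int × List Int) : PySem.Set Int :=
  PySem.Set.union (PySem.Set.inter (PySem.Set.ofList a.1) (PySem.Set.ofList b.2))
    (PySem.Set.inter (PySem.Set.ofList a.2) (PySem.Set.ofList b.1))

-- 'for (a0,a1),(b0,b1) in zip(s, s[1:] + [s[0]]): for r in movers: counts[r] = counts.get(r,0)+1'
-- (the counter is only looked up afterwards, so Python's set-iteration order cannot matter)
def pvB_counts (s : List (List Int × List Int)) : PySem.Dict Int Int :=
  (s.zip (s.drop 1 ++ [s.headI])).foldl
    (fun d p => (pvB_movers p.1 p.2).foldl (fun d r => d.modify r 0 (· + 1)) d)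
    PySem.Dict.empty

def check_equal_number_of_switches_alt (s : List (List Int × List Int)) : Bool :=
  let counts := pvB_counts s   -- s[0] on empty s raises IndexError, excluded by Pre_
  (PySem.Set.ofList [counts.getD 1 0, counts.getD 2 0, counts.getD 3 0, counts.getD 4 0]).length == 1

-- ===== PRECONDITION & SPEC =====
-- Pre_ excludes the empty list, where both A and B raise IndexError on s[0].
def Pre_check_equal_number_of_switches (s : List (List Int × List Int)) : Prop := s ≠ []
instance (s : List (List Int × List Int)) : Decidable (Pre_check_equal_number_of_switches s) := by unfold Pre_check_equal_number_of_switches; infer_instance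
def pvWitness_check_equal_number_of_switches : (List (List Int × List Int)) := [([1, 2], [3, 4]), ([1, 3], [2, 4])]

def Spec_check_equal_number_of_switches (s : List (List Int × List Int)) (out : Bool) : Prop := out = check_equal_number_of_switches_alt s
instance (s : List (List Int × List Int)) (out : Bool) : Decidable (Spec_check_equal_number_of_switches s out) := by unfold Spec_check_equal_number_of_switches; infer_instance

-- ===== CLAIM (what is proved, stated in full; the proofs are below) =====
def Claim_equal_check_equal_number_of_switches : Prop := ∀ (s : List (List Int × List Int)), Dom_check_equal_number_of_switches s → Pre_check_equal_number_of_switches s → Spec_check_equal_number_of_switches s (check_equal_number_of_switches s)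

-- ===== LEMMAS AND PROOFS =====

-- membership in B's per-pair mover set is exactly A's switch condition
lemma pvB_movers_mem (a b : List Int × List Int) (r : Int) :
    r ∈ pvB_movers a b ↔ (r ∈ a.1 ∧ r ∈ b.2) ∨ (r ∈ a.2 ∧ r ∈ b.1) := by
  simp [pvB_movers, PySem.Set.mem_union, PySem.Set.mem_inter, PySem.Set.mem_ofList]

-- B's counter: each pair contributes 1 to ranger r iff r is in its mover set
lemma pvB_counts_getD (l : List ((List Int × List Int) × (List Int × List Int)))
    (d : PySem.Dict Int Int) (r : Int) :
    (l.foldl (fun d p => (pvB_movers p.1 p.2).foldl (fun d r => d.modify r 0 (· + 1)) d) d).getD r 0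
      = d.getD r 0 + (l.countP (fun p =>
          decide ((r ∈ p.1.1 ∧ r ∈ p.2.2) ∨ (r ∈ p.1.2 ∧ r ∈ p.2.1))) : Int) := by
  induction l generalizing d with
  | nil => simp
  | cons p t ih =>
    simp only [List.foldl_cons, ih, PySem.Dict.getD_foldl_modify_add_one, List.countP_cons]
    have hnd : (pvB_movers p.1 p.2).Nodup := by
      exact PySem.Set.nodup_union _ _ (PySem.Set.nodup_inter _ _ (PySem.Set.nodup_ofList _))
    by_cases h : (r ∈ p.1.1 ∧ r ∈ p.2.2) ∨ (r ∈ p.1.2 ∧ r ∈ p.2.1)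
    · have hm : r ∈ pvB_movers p.1 p.2 := (pvB_movers_mem _ _ _).mpr h
      rw [List.count_eq_one_of_mem hnd hm]
      simp [h]; ring
    · have hm : r ∉ pvB_movers p.1 p.2 := fun hc => h ((pvB_movers_mem _ _ _).mp hc)
      rw [List.count_eq_zero_of_not_mem hm]
      simp [h]

-- adjacent pairs of l ++ [x] are zip l (l.drop 1 ++ [x]); stated via pvA_count directly
lemma pvA_count_eq_countP (r : Int) (l : List (List Int × List Int)) (x : List Int × List Int) :
    pvA_count r (l ++ [x]) = ((l.zip (l.drop 1 ++ [x])).countP (fun p =>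
      decide ((r ∈ p.1.1 ∧ r ∈ p.2.2) ∨ (r ∈ p.1.2 ∧ r ∈ p.2.1))) : Int) := by
  induction l with
  | nil => simp [pvA_count]
  | cons a t ih =>
    cases t with
    | nil =>
      simp only [List.nil_append, List.drop_succ_cons, List.drop_nil, List.cons_append,
        List.zip_cons_cons, List.zip_nil_left, List.countP_cons, List.countP_nil]
      show (if _ then (1 : Int) else 0) + pvA_count r [x] = _
      simp [pvA_count]
    | cons b t' =>
      have h1 : pvA_count r ((a :: b :: t') ++ [x])
          = (if (r ∈ a.1 ∧ r ∈ b.2) ∨ (r ∈ a.2 ∧ r ∈ b.1) then 1 else 0)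
            + pvA_count r ((b :: t') ++ [x]) := rfl
      have h2 : (a :: b :: t').zip ((a :: b :: t').drop 1 ++ [x])
          = (a, b) :: (b :: t').zip ((b :: t').drop 1 ++ [x]) := by
        simp
      rw [h1, h2, ih, List.countP_cons]
      push_cast
      split_ifs <;> simp_all <;> first | omega | tauto

lemma pvB_counts_eq_pvA_count (s : List (List Int × List Int)) (r : Int) :
    (pvB_counts s).getD r 0 = pvA_count r (s ++ [s.headI]) := by
  rw [pvB_counts, pvB_counts_getD, pvA_count_eq_countP]
  simp

-- A's ranger loop, unfolded: the four successive min/max early-exit checks.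
def pvChain (c1 c2 c3 c4 : Int) : Bool :=
  if PySem.List.min? [c1] (fun x => x) ≠ PySem.List.max? [c1] (fun x => x) then false
  else if PySem.List.min? [c1, c2] (fun x => x) ≠ PySem.List.max? [c1, c2] (fun x => x) then false
  else if PySem.List.min? [c1, c2, c3] (fun x => x) ≠ PySem.List.max? [c1, c2, c3] (fun x => x) then false
  else if PySem.List.min? [c1, c2, c3, c4] (fun x => x) ≠ PySem.List.max? [c1, c2, c3, c4] (fun x => x) then false
  else true

lemma pvA_eval (s : List (List Int × List Int)) :
    pvA_loop s [1, 2, 3, 4] [] =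
      pvChain (pvA_count 1 (s ++ [s.headI])) (pvA_count 2 (s ++ [s.headI]))
        (pvA_count 3 (s ++ [s.headI])) (pvA_count 4 (s ++ [s.headI])) := by
  simp [pvA_loop, pvChain]

lemma pvChain_iff (c1 c2 c3 c4 : Int) :
    pvChain c1 c2 c3 c4 = decide (c1 = c2 ∧ c1 = c3 ∧ c1 = c4) := by
  simp only [pvChain, PySem.List.min?_id_cons, PySem.List.max?_id_cons, List.foldl, ne_eq,
    Option.some.injEq]
  split_ifs <;> simp_all

lemma pvSet4_iff (c1 c2 c3 c4 : Int) :
    ((PySem.Set.ofList [c1, c2, c3, c4]).length == 1) = decide (c1 = c2 ∧ c1 = c3 ∧ c1 = c4) := by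
  simp only [PySem.Set.ofList, PySem.Set.add, PySem.Set.contains, List.foldl]
  split_ifs <;> simp_all <;> omega

-- ===== VERDICT (by name: the statement is the Claim_ definition above) =====
theorem check_equal_number_of_switches_spec : Claim_equal_check_equal_number_of_switches := by
  intro s _ _
  unfold Spec_check_equal_number_of_switches
  unfold check_equal_number_of_switches check_equal_number_of_switches_alt
  show pvA_loop s [1, 2, 3, 4] [] = _
  rw [pvA_eval, pvChain_iff]
  simp only [pvB_counts_eq_pvA_count]
  rw [pvSet4_iff]
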